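-- pv_equiv track=rewrite | github.com/freemjstudio/minjee-s_algorithm | programmers/cache.py | solution
-- ===== SOURCE A (Python) =====
-- def solution(cacheSize, cities):
--     answer = 0
--     cache = {}
--     for city in cities:
--         city = city.lower()
--         if city in cache:
--             cache[city] += 1
--             answer += 1  # hit
--
--         else:
--             if len(cache) <= cacheSize:
--                 answer += 5  # miss
--                 cache[city] = 1
--
--             else:
--                 # 가장 least recently used 를 pop 해야 함
--                 key = min(cache, key=cache.get)
--                 cache.pop(key)
--                 answer += 5
--                 cache[city] = 1
--
--     return answer
-- ===== SOURCE B (Python) =====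
-- # Same cache simulation, but the cache is kept as a list of (count, seq, city)
-- # entries ordered ascending by (count, seq): the eviction victim is always the
-- # head of the list, instead of a min-scan over a dict as in A.
-- def _insert(cache, entry):
--     i = 0
--     while i < len(cache) and cache[i][:2] < entry[:2]:
--         i += 1
--     cache.insert(i, entry)
--
--
-- def solution(cacheSize, cities):
--     answer = 0
--     cache = []   # (count, seq, city), ascending by (count, seq)
--     seq = 0
--     for city in cities:
--         city = city.lower()
--         for i in range(len(cache)):
--             if cache[i][2] == city:
--                 cnt, s, _ = cache.pop(i)
--                 _insert(cache, (cnt + 1, s, city))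
--                 answer += 1
--                 break
--         else:
--             if len(cache) > cacheSize:
--                 cache.pop(0)
--             _insert(cache, (1, seq, city))
--             seq += 1
--             answer += 5
--     return answer
-- ===== Notes on version B (the rewrite author's own statement) =====
-- stated objective: alternative
-- what changed: A keeps a dict of counts and evicts by a min-scan over the dict (min with key=cache.get); B keeps the cache as a list of (count, seq, city) entries maintained in ascending (count, seq) order, so the eviction victim is always the head of the list and is popped in O(1), while hits reposition their entry in the ordered list.
import Mathlib
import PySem

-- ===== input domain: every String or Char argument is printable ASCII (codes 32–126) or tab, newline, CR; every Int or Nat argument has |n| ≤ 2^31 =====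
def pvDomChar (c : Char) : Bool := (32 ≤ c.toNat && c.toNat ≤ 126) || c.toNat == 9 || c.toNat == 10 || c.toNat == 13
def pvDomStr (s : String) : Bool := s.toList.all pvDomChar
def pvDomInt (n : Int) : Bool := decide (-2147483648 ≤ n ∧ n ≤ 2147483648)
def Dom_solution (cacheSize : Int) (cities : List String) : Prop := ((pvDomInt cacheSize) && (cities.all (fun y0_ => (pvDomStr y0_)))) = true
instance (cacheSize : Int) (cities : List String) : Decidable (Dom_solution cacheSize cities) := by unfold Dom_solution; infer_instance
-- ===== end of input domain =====

-- B keeps the cache as a list ordered by (count, seq): eviction pops the head, instead of A's min-scan over a dict. Objective: alternative.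

-- ===== PORT A =====
-- one loop iteration of A: state is (answer, cache dict city ↦ count)
def stepA (cacheSize : Int) (st : Int × PySem.Dict String Int) (city0 : String) : Int × PySem.Dict String Int :=
  let city := PySem.Str.lower city0
  let ans := st.1
  let d := st.2
  if d.contains city then
    (ans + 1, d.modify city 0 (· + 1))          -- cache[city] += 1 (key present)
  else if (d.size : Int) ≤ cacheSize then
    (ans + 5, d.insert city 1)
  else
    match PySem.List.min? d.keys (fun k => d.getD k 0) with   -- min(cache, key=cache.get); keys all present so get = getD _ 0
    | some key => (ans + 5, (d.erase key).insert city 1)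
    | none => (ans + 5, d.insert city 1)        -- unreachable under Pre_: min() of an empty dict raises ValueError

def solution (cacheSize : Int) (cities : List String) : Int :=
  (cities.foldl (stepA cacheSize) (0, PySem.Dict.mk [])).1

-- ===== PORT B =====
-- an entry is (count, seq, city)
-- Python tuple comparison cache[i][:2] < entry[:2] (lexicographic on the two ints)
def keyLtB (x e : Int × Int × String) : Bool := x.1 < e.1 || (x.1 == e.1 && x.2.1 < e.2.1)

-- Source B's _insert: walk past entries with smaller (count, seq), insert there
def insB (cache : List (Int × Int × String)) (e : Int × Int × String) : List (Int × Int × String) :=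
  match cache with
  | [] => [e]
  | x :: xs => if keyLtB x e then x :: insB xs e else e :: x :: xs

-- Source B's hit scan: first entry whose city matches, returned with the list without it (cache.pop(i))
def popCity (city : String) : List (Int × Int × String) → Option ((Int × Int × String) × List (Int × Int × String))
  | [] => none
  | x :: xs => if x.2.2 == city then some (x, xs)
               else (popCity city xs).map (fun p => (p.1, x :: p.2))

-- one loop iteration of B: state is (answer, cache list, seq)
def stepB (cacheSize : Int) (st : Int × List (Int × Int × String) × Int) (city0 : String) : Int × List (Int × Int × String) × Int :=
  let city := PySem.Str.lower city0
  let ans := st.1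
  let l := st.2.1
  let ctr := st.2.2
  match popCity city l with
  | some (e, r) => (ans + 1, insB r (e.1 + 1, e.2.1, city), ctr)
  | none =>
    let l' := if cacheSize < (l.length : Int) then l.tail else l   -- cache.pop(0); on [] Python raises IndexError (outside Pre_)
    (ans + 5, insB l' (1, ctr, city), ctr + 1)

def solution_alt (cacheSize : Int) (cities : List String) : Int :=
  (cities.foldl (stepB cacheSize) (0, [], 0)).1

-- ===== PRECONDITION & SPEC =====
-- Pre_ excludes exactly the inputs where A raises: cacheSize < 0 with at least one city reaches
-- min() of an empty dict, a ValueError (B raises there too, IndexError on pop from an empty list).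
def Pre_solution (cacheSize : Int) (cities : List String) : Prop := 0 ≤ cacheSize ∨ cities = []
instance (cacheSize : Int) (cities : List String) : Decidable (Pre_solution cacheSize cities) := by unfold Pre_solution; infer_instance

def pvWitness_solution : Int × List String := (2, ["Jeju", "Pangyo", "Seoul", "jeju", "Pangyo", "seoul", "NewYork", "LA"])

def Spec_solution (cacheSize : Int) (cities : List String) (out : Int) : Prop := out = solution_alt cacheSize cities
instance (cacheSize : Int) (cities : List String) (out : Int) : Decidable (Spec_solution cacheSize cities out) := by unfold Spec_solution; infer_instance

-- ===== CLAIM (what is proved, stated in full; the proofs are below) =====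
def Claim_equal_solution : Prop := ∀ (cacheSize : Int) (cities : List String), Dom_solution cacheSize cities → Pre_solution cacheSize cities → Spec_solution cacheSize cities (solution cacheSize cities)

-- ===== LEMMAS AND PROOFS =====

-- projection from a B-entry to a dict item
def eProj (e : Int × Int × String) : String × Int := (e.2.2, e.1)

-- strict lexicographic order on (count, seq) as a Prop
def eLt (a b : Int × Int × String) : Prop := a.1 < b.1 ∨ (a.1 = b.1 ∧ a.2.1 < b.2.1)

-- coupling invariant between A's dict and B's ordered list:
-- t is B's multiset of entries arranged in dict (= insertion/seq) order
def CacheInv (d : PySem.Dict String Int) (l : List (Int × Int × String)) (ctr : Int) : Prop :=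
  ∃ t : List (Int × Int × String),
    d.items = t.map eProj ∧
    (t.map fun e => e.2.1).Pairwise (· < ·) ∧
    (∀ e ∈ t, e.2.1 < ctr) ∧
    (t.map fun e => e.2.2).Nodup ∧
    l.Perm t ∧
    l.Pairwise eLt

lemma popCity_some {city : String} {l : List (Int × Int × String)} {e r}
    (h : popCity city l = some (e, r)) :
    ∃ u v, l = u ++ e :: v ∧ r = u ++ v ∧ e.2.2 = city := by
  induction l generalizing r with
  | nil => simp [popCity] at h
  | cons x xs ih =>
    by_cases hx : x.2.2 = city
    · rw [popCity, if_pos (by exact beq_iff_eq.mpr hx)] at h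
      obtain ⟨rfl, rfl⟩ := Prod.mk.inj (Option.some.inj h)
      exact ⟨[], xs, by simp, by simp, hx⟩
    · rw [popCity, if_neg (by simp [hx])] at h
      cases hq : popCity city xs with
      | none => rw [hq] at h; simp at h
      | some q =>
        rw [hq] at h; simp only [Option.map_some] at h
        obtain ⟨he, hr⟩ := Prod.mk.inj (Option.some.inj h)
        obtain ⟨u, v, h1, h2, h3⟩ := ih (he ▸ hq : popCity city xs = some (e, q.2))
        exact ⟨x :: u, v, by simp [h1], by simp [← hr, h2], h3⟩

lemma popCity_none {city : String} {l : List (Int × Int × String)}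
    (h : popCity city l = none) : ∀ e ∈ l, e.2.2 ≠ city := by
  induction l with
  | nil => simp
  | cons x xs ih =>
    by_cases hx : x.2.2 = city
    · rw [popCity, if_pos (by exact beq_iff_eq.mpr hx)] at h; simp at h
    · rw [popCity, if_neg (by simp [hx])] at h
      intro e hme
      rcases List.mem_cons.mp hme with hme | hme
      · subst hme; exact hx
      · exact ih (Option.map_eq_none_iff.mp h) e hme

lemma popCity_isSome {city : String} {l : List (Int × Int × String)}
    (h : ∃ e ∈ l, e.2.2 = city) : (popCity city l).isSome := by
  cases hp : popCity city l with
  | some p => simp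
  | none => rcases h with ⟨e, hme, hc⟩; exact absurd hc (popCity_none hp e hme)

lemma insB_perm (r : List (Int × Int × String)) (e) : (insB r e).Perm (e :: r) := by
  induction r with
  | nil => simp [insB]
  | cons x xs ih =>
    rw [insB]
    by_cases h : keyLtB x e
    · rw [if_pos h]
      exact (ih.cons x).trans (List.Perm.swap e x xs)
    · rw [if_neg h]

lemma insB_sorted {r : List (Int × Int × String)} {e} (hs : r.Pairwise eLt)
    (hne : ∀ x ∈ r, x.2.1 ≠ e.2.1) : (insB r e).Pairwise eLt := by
  induction r with
  | nil => simp [insB]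
  | cons x xs ih =>
    rw [insB]
    rw [List.pairwise_cons] at hs
    by_cases h : keyLtB x e
    · rw [if_pos h]
      rw [List.pairwise_cons]
      constructor
      · intro y hy
        have := (insB_perm xs e).mem_iff.mp hy
        rcases List.mem_cons.mp this with rfl | hy'
        · simp only [keyLtB, Bool.or_eq_true, decide_eq_true_eq, Bool.and_eq_true, beq_iff_eq] at h
          unfold eLt; rcases h with h | h
          · exact Or.inl h
          · exact Or.inr ⟨h.1, h.2⟩
        · exact hs.1 y hy'
      · exact ih hs.2 (fun y hy => hne y (List.mem_cons_of_mem x hy))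
    · rw [if_neg h]
      rw [List.pairwise_cons]
      constructor
      · intro y hy
        have hlt : eLt e x := by
          simp only [keyLtB, Bool.or_eq_true, decide_eq_true_eq, Bool.and_eq_true, beq_iff_eq, not_or, not_and] at h
          have hnx := hne x (List.mem_cons_self ..)
          unfold eLt
          rcases lt_trichotomy e.1 x.1 with h1 | h1 | h1
          · exact Or.inl h1
          · right; refine ⟨h1, ?_⟩
            have := h.2
            rcases lt_trichotomy e.2.1 x.2.1 with h2 | h2 | h2
            · exact h2
            · exact absurd h2.symm hnx
            · exact absurd h2 (by have := h.2 h1.symm; omega)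
          · exact absurd h1 (by have := h.1; omega)
        rcases List.mem_cons.mp hy with rfl | hy'
        · exact hlt
        · have := hs.1 y hy'
          unfold eLt at *; omega
      · exact List.pairwise_cons.mpr hs


def minStep (key : String → Int) (acc : Option String) (x : String) : Option String :=
  match acc with
  | none => some x
  | some m => if key x < key m then some x else some m

lemma min?_eq_foldl_minStep (l : List String) (key : String → Int) :
    PySem.List.min? l key = l.foldl (minStep key) none := by
  unfold PySem.List.min?
  exact List.foldl_ext _ _ none (fun a x _ => by cases a <;> rfl)

lemma minp_split (key : String → Int) (u v : List String) (m : String)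
    (hu : ∀ x ∈ u, key m < key x) (hv : ∀ x ∈ v, ¬ key x < key m) :
    PySem.List.min? (u ++ m :: v) key = some m := by
  have keep : ∀ (w : List String) (a : String), (∀ x ∈ w, ¬ key x < key a) →
      List.foldl (minStep key) (some a) w = some a := by
    intro w
    induction w with
    | nil => intro a _; rfl
    | cons x xs ih =>
      intro a hw
      simp only [List.foldl_cons, minStep]
      rw [if_neg (hw x (List.mem_cons_self ..))]
      exact ih a (fun y hy => hw y (List.mem_cons_of_mem x hy))
  have from_acc : ∀ (u' : List String) (a : String), key m < key a →
      (∀ x ∈ u', key m < key x) →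
      List.foldl (minStep key) (some a) (u' ++ m :: v) = some m := by
    intro u'
    induction u' with
    | nil =>
      intro a ha _
      simp only [List.nil_append, List.foldl_cons, minStep]
      rw [if_pos ha]
      exact keep v m (fun x hx => by have := hv x hx; omega)
    | cons x xs ih =>
      intro a ha hu'
      simp only [List.cons_append, List.foldl_cons]
      by_cases hx : key x < key a
      · rw [show minStep key (some a) x = some x from by simp [minStep, hx]]; exact ih x (hu' x (List.mem_cons_self ..)) (fun y hy => hu' y (List.mem_cons_of_mem x hy))
      · rw [show minStep key (some a) x = some a from by simp [minStep, hx]]; exact ih a ha (fun y hy => hu' y (List.mem_cons_of_mem x hy))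
  rw [min?_eq_foldl_minStep]
  cases u with
  | nil =>
    simp only [List.nil_append, List.foldl_cons, minStep]
    exact keep v m (fun x hx => by have := hv x hx; omega)
  | cons x xs =>
    simp only [List.cons_append, List.foldl_cons, minStep]
    exact from_acc xs x (hu x (List.mem_cons_self ..)) (fun y hy => hu y (List.mem_cons_of_mem x hy))

lemma find_items {t : List (Int × Int × String)} (hnd : (t.map fun e => e.2.2).Nodup)
    {x} (hx : x ∈ t) :
    List.find? (fun p => p.1 == x.2.2) (t.map eProj) = some (x.2.2, x.1) := by
  induction t with
  | nil => simp at hx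
  | cons a t' ih =>
    simp only [List.map_cons, List.nodup_cons] at hnd
    rcases List.mem_cons.mp hx with rfl | hx'
    · simp [eProj]
    · have hne : a.2.2 ≠ x.2.2 := fun h => hnd.1 (h ▸ List.mem_map_of_mem hx')
      rw [List.map_cons, List.find?_cons_of_neg (by simp [eProj, hne])]
      exact ih hnd.2 hx'

lemma overwrite_items {t₁ t₂ : List (Int × Int × String)} {e : Int × Int × String} {v : Int}
    (h₁ : e.2.2 ∉ t₁.map fun x => x.2.2) (h₂ : e.2.2 ∉ t₂.map fun x => x.2.2) :
    ((t₁ ++ e :: t₂).map eProj).map (fun p => if p.1 == e.2.2 then (e.2.2, v) else p)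
      = (t₁ ++ (v, e.2.1, e.2.2) :: t₂).map eProj := by
  induction t₁ with
  | nil =>
    simp only [List.nil_append, List.map_cons, eProj, beq_self_eq_true, if_pos]
    congr 1
    rw [List.map_map, List.map_eq_map_iff.mpr]
    intro y hy
    have : y.2.2 ≠ e.2.2 := fun h => h₂ (h ▸ List.mem_map_of_mem hy)
    simp [eProj, this]
  | cons a t' ih =>
    simp only [List.map_cons, List.mem_cons, not_or] at h₁
    have hne : a.2.2 ≠ e.2.2 := fun h => h₁.1 h.symm
    simp only [List.cons_append, List.map_cons]
    have hb : ((eProj a).1 == e.2.2) = false := by simp [eProj, hne]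
    simp only [hb, Bool.false_eq_true, if_false]
    congr 1
    exact ih h₁.2

lemma erase_items {t₁ t₂ : List (Int × Int × String)} {e : Int × Int × String}
    (h₁ : e.2.2 ∉ t₁.map fun x => x.2.2) (h₂ : e.2.2 ∉ t₂.map fun x => x.2.2) :
    ((t₁ ++ e :: t₂).map eProj).filter (fun p => !(p.1 == e.2.2))
      = (t₁ ++ t₂).map eProj := by
  induction t₁ with
  | nil =>
    simp only [List.nil_append, List.map_cons, List.filter_cons]
    simp only [eProj, beq_self_eq_true, Bool.not_true, Bool.false_eq_true, if_false]
    have hall : ∀ p ∈ List.map eProj t₂, (!(p.1 == e.2.2)) = true := by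
      intro p hp
      obtain ⟨y, hy, rfl⟩ := List.mem_map.mp hp
      have : y.2.2 ≠ e.2.2 := fun h => h₂ (h ▸ List.mem_map_of_mem hy)
      simp [eProj, this]
    rw [List.filter_eq_self.mpr hall]
  | cons a t' ih =>
    simp only [List.map_cons, List.mem_cons, not_or] at h₁
    have hne : a.2.2 ≠ e.2.2 := fun h => h₁.1 h.symm
    simp only [List.cons_append, List.map_cons, List.filter_cons]
    have hb : ((eProj a).1 == e.2.2) = false := by simp [eProj, hne]
    simp only [hb, Bool.not_false, if_true]
    rw [ih h₁.2]


lemma contains_eq {d : PySem.Dict String Int} {t : List (Int × Int × String)} (hitems : d.items = t.map eProj) (city : String) :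
    d.contains city = t.any (fun e => e.2.2 == city) := by
  simp [PySem.Dict.contains, hitems, List.any_map, eProj, Function.comp_def]

lemma getD_eq {d : PySem.Dict String Int} {t : List (Int × Int × String)} (hitems : d.items = t.map eProj)
    (hnd : (t.map fun e => e.2.2).Nodup) {x} (hx : x ∈ t) : d.getD x.2.2 0 = x.1 := by
  simp [PySem.Dict.getD, PySem.Dict.get?, hitems, find_items hnd hx]

lemma nodup_split {α β : Type} (f : α → β) {t₁ t₂ : List α} {e : α}
    (hnd : ((t₁ ++ e :: t₂).map f).Nodup) :
    f e ∉ (t₁.map f) ∧ f e ∉ (t₂.map f) ∧ ((t₁ ++ t₂).map f).Nodup := by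
  simp only [List.map_append, List.map_cons, List.nodup_append, List.nodup_cons] at hnd ⊢
  obtain ⟨h1, ⟨h2a, h2b⟩, h3⟩ := hnd
  refine ⟨?_, h2a, h1, h2b, ?_⟩
  · intro hmem
    exact (h3 _ hmem _ (List.mem_cons_self ..)) rfl
  · intro a ha b hb
    exact h3 a ha b (List.mem_cons_of_mem _ hb)

lemma seq_split {t₁ t₂ : List (Int × Int × String)} {e : Int × Int × String}
    (hseq : ((t₁ ++ e :: t₂).map fun x => x.2.1).Pairwise (· < ·)) :
    (∀ x ∈ t₁, x.2.1 < e.2.1) ∧ (∀ x ∈ t₂, e.2.1 < x.2.1) ∧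
      ((t₁ ++ t₂).map fun x => x.2.1).Pairwise (· < ·) := by
  simp only [List.map_append, List.map_cons, List.pairwise_append, List.pairwise_cons] at hseq ⊢
  obtain ⟨h1, ⟨h2a, h2b⟩, h3⟩ := hseq
  refine ⟨?_, ?_, h1, h2b, ?_⟩
  · intro x hx
    exact h3 _ (List.mem_map_of_mem hx) _ (List.mem_cons_self ..)
  · intro x hx
    exact h2a _ (List.mem_map_of_mem hx)
  · intro a ha b hb
    exact h3 a ha b (List.mem_cons_of_mem _ hb)

lemma perm_cancel {l u v t₁ t₂ : List (Int × Int × String)} {e : Int × Int × String}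
    (hl : l = u ++ e :: v) (hperm : l.Perm (t₁ ++ e :: t₂)) : (u ++ v).Perm (t₁ ++ t₂) := by
  have h1 : (e :: (u ++ v)).Perm (e :: (t₁ ++ t₂)) :=
    (List.perm_middle.symm).trans ((hl ▸ hperm).trans List.perm_middle)
  exact h1.cons_inv

lemma seqs_nodup {l t : List (Int × Int × String)} (hperm : l.Perm t)
    (hseq : (t.map fun e => e.2.1).Pairwise (· < ·)) : (l.map fun e => e.2.1).Nodup := by
  have h1 : (t.map fun e => e.2.1).Nodup := hseq.imp (fun h => ne_of_lt h)
  exact (hperm.map (fun e => e.2.1)).nodup_iff.mpr h1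

lemma step_ok (cacheSize : Int) (hcs : 0 ≤ cacheSize) (city0 : String)
    {ans : Int} {d : PySem.Dict String Int} {l ctr} (h : CacheInv d l ctr) :
    (stepA cacheSize (ans, d) city0).1 = (stepB cacheSize (ans, l, ctr) city0).1 ∧
    CacheInv (stepA cacheSize (ans, d) city0).2 (stepB cacheSize (ans, l, ctr) city0).2.1
        (stepB cacheSize (ans, l, ctr) city0).2.2 := by
  obtain ⟨t, hitems, hseq, hbound, hnd, hperm, hsort⟩ := h
  set city := PySem.Str.lower city0 with hcity
  have hcont := contains_eq hitems city
  by_cases hc : d.contains city = true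
  case pos =>
    -- HIT: the entry is repositioned with count+1; the dict value is bumped in place
    have hex : ∃ e ∈ l, e.2.2 = city := by
      rw [hcont] at hc
      obtain ⟨e, he, hbe⟩ := List.any_eq_true.mp hc
      exact ⟨e, hperm.mem_iff.mpr he, beq_iff_eq.mp hbe⟩
    obtain ⟨⟨e, r⟩, hp⟩ := Option.isSome_iff_exists.mp (popCity_isSome hex)
    obtain ⟨u, v, hlu, hru, hec⟩ := popCity_some hp
    have hel : e ∈ l := by rw [hlu]; exact List.mem_append_right _ (List.mem_cons_self ..)
    have het : e ∈ t := hperm.mem_iff.mp hel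
    obtain ⟨t₁, t₂, hts⟩ := List.append_of_mem het
    obtain ⟨hn1, hn2, -⟩ := nodup_split (fun x : Int × Int × String => x.2.2) (by rw [← hts]; exact hnd)
    have hget : d.getD e.2.2 0 = e.1 := getD_eq hitems hnd het
    have hA : stepA cacheSize (ans, d) city0 = (ans + 1, d.modify city 0 (· + 1)) := by
      simp only [stepA, ← hcity, hc, if_true]
    have hB : stepB cacheSize (ans, l, ctr) city0 = (ans + 1, insB r (e.1 + 1, e.2.1, city), ctr) := by
      simp only [stepB, ← hcity, hp]
    rw [hA, hB]
    refine ⟨rfl, ?_⟩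
    show CacheInv (d.modify city 0 (· + 1)) (insB r (e.1 + 1, e.2.1, city)) ctr
    refine ⟨t₁ ++ (e.1 + 1, e.2.1, e.2.2) :: t₂, ?_, ?_, ?_, ?_, ?_, ?_⟩
    · -- items
      show (d.insert city (d.getD city 0 + 1)).items = _
      rw [← hec] at hc ⊢
      rw [hget]
      simp only [PySem.Dict.insert, hc, if_true]
      rw [hitems, hts]
      exact overwrite_items hn1 hn2
    · -- seqs sorted
      have hmapeq : ((t₁ ++ (e.1 + 1, e.2.1, e.2.2) :: t₂).map fun x => x.2.1)
          = (t.map fun x => x.2.1) := by simp [hts]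
      rw [hmapeq]; exact hseq
    · -- seq bound
      intro x hx
      rcases List.mem_append.mp hx with hx1 | hx2
      · exact hbound x (by rw [hts]; exact List.mem_append_left _ hx1)
      · rcases List.mem_cons.mp hx2 with rfl | hx3
        · exact hbound e het
        · exact hbound x (by rw [hts]; exact List.mem_append_right _ (List.mem_cons_of_mem _ hx3))
    · -- city nodup
      have hmapeq : ((t₁ ++ (e.1 + 1, e.2.1, e.2.2) :: t₂).map fun x => x.2.2)
          = (t.map fun x => x.2.2) := by simp [hts]
      rw [hmapeq]; exact hnd
    · -- permutation
      rw [← hec]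
      have h1 : (u ++ v).Perm (t₁ ++ t₂) := perm_cancel hlu (hts ▸ hperm)
      refine (insB_perm r _).trans ?_
      rw [hru]
      exact ((h1.cons _).trans List.perm_middle.symm)
    · -- sortedness
      have hrs : r.Pairwise eLt := by
        rw [hru]
        refine hsort.sublist ?_
        rw [hlu]
        exact (List.sublist_cons_self e v).append_left u
      refine insB_sorted hrs ?_
      obtain ⟨hq1, hq2, _⟩ := nodup_split (fun x : Int × Int × String => x.2.1) (by rw [← hlu]; exact seqs_nodup hperm hseq)
      intro x hx
      rw [hru] at hx
      rcases List.mem_append.mp hx with hx1 | hx2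
      · exact fun hq => hq1 (by rw [← hq]; exact List.mem_map_of_mem hx1)
      · exact fun hq => hq2 (by rw [← hq]; exact List.mem_map_of_mem hx2)
  case neg =>
    -- MISS
    have hcf : d.contains city = false := by
      rw [Bool.eq_false_iff]; exact hc
    have hanyf : (t.any fun e => e.2.2 == city) = false := by rw [← hcont]; exact hcf
    have hpn : popCity city l = none := by
      cases hpc : popCity city l with
      | none => rfl
      | some q =>
        obtain ⟨e2, r2⟩ := q
        obtain ⟨u, v, hlu, _, hec⟩ := popCity_some hpc
        exfalso; apply hc
        rw [hcont]
        refine List.any_eq_true.mpr ⟨e2, hperm.mem_iff.mp ?_, beq_iff_eq.mpr hec⟩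
        rw [hlu]; exact List.mem_append_right _ (List.mem_cons_self ..)
    have hlen : (d.size : Int) = (l.length : Int) := by
      simp [PySem.Dict.size, hitems, hperm.length_eq]
    by_cases hsz : (d.size : Int) ≤ cacheSize
    case pos =>
      -- room in the cache: plain insert
      have hB : stepB cacheSize (ans, l, ctr) city0 = (ans + 5, insB l (1, ctr, city), ctr + 1) := by
        have : ¬ (cacheSize < (l.length : Int)) := by rw [← hlen]; omega
        simp only [stepB, ← hcity, hpn, this, if_false]
      have hA : stepA cacheSize (ans, d) city0 = (ans + 5, d.insert city 1) := by
        simp only [stepA, ← hcity, hcf, Bool.false_eq_true, if_false, hsz, if_true]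
      rw [hA, hB]
      refine ⟨rfl, ?_⟩
      show CacheInv (d.insert city 1) (insB l (1, ctr, city)) (ctr + 1)
      have hnotin : ∀ x ∈ t, x.2.2 ≠ city := by
        intro x hx hq
        have ht : t.any (fun e => e.2.2 == city) = true := List.any_eq_true.mpr ⟨x, hx, beq_iff_eq.mpr hq⟩
        rw [ht] at hanyf; exact Bool.noConfusion hanyf
      refine ⟨t ++ [(1, ctr, city)], ?_, ?_, ?_, ?_, ?_, ?_⟩
      · simp only [PySem.Dict.insert, hcf, Bool.false_eq_true, if_false]
        rw [hitems]
        simp [eProj]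
      · simp only [List.map_append, List.map_singleton]
        rw [List.pairwise_append]
        refine ⟨hseq, List.pairwise_singleton _ _, ?_⟩
        intro a ha b hb
        rcases List.mem_singleton.mp hb with rfl
        obtain ⟨x, hx, rfl⟩ := List.mem_map.mp ha
        exact hbound x hx
      · intro x hx
        rcases List.mem_append.mp hx with hx1 | hx2
        · have := hbound x hx1; omega
        · rcases List.mem_singleton.mp hx2 with rfl; exact lt_add_one _
      · simp only [List.map_append, List.map_singleton]
        rw [List.nodup_append]
        refine ⟨hnd, List.nodup_singleton _, ?_⟩
        intro a ha b hb
        rcases List.mem_singleton.mp hb with rfl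
        obtain ⟨x, hx, rfl⟩ := List.mem_map.mp ha
        exact hnotin x hx
      · refine (insB_perm l _).trans ?_
        exact (hperm.cons _).trans (List.perm_append_singleton _ _).symm
      · refine insB_sorted hsort ?_
        intro x hx hq
        have := hbound x (hperm.mem_iff.mp hx)
        simp at hq; omega
    case neg =>
      -- eviction: A pops the min-count key, B pops the head of the ordered list
      have hlpos : 0 < l.length := by
        have : cacheSize < (l.length : Int) := by rw [← hlen]; omega
        omega
      obtain ⟨hh, rest, hl⟩ : ∃ hh rest, l = hh :: rest := by
        cases l with
        | nil => simp at hlpos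
        | cons a as => exact ⟨a, as, rfl⟩
      have hht : hh ∈ t := hperm.mem_iff.mp (hl ▸ List.mem_cons_self ..)
      obtain ⟨t₁, t₂, hts⟩ := List.append_of_mem hht
      obtain ⟨hn1, hn2, hn3⟩ := nodup_split (fun x : Int × Int × String => x.2.2) (by rw [← hts]; exact hnd)
      obtain ⟨hs1, -, hs3⟩ := seq_split (by rw [← hts]; exact hseq)
      have hnotin : ∀ x ∈ t, x.2.2 ≠ city := by
        intro x hx hq
        have ht : t.any (fun e => e.2.2 == city) = true := List.any_eq_true.mpr ⟨x, hx, beq_iff_eq.mpr hq⟩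
        rw [ht] at hanyf; exact Bool.noConfusion hanyf
      -- every other entry of t is behind hh in l, hence eLt hh x
      have hrest : ∀ x ∈ t, x ≠ hh → eLt hh x := by
        intro x hx hne
        have : x ∈ l := hperm.mem_iff.mpr hx
        rw [hl] at this
        rcases List.mem_cons.mp this with rfl | hx2
        · exact absurd rfl hne
        · exact (List.pairwise_cons.mp (hl ▸ hsort)).1 x hx2
      have hne1 : ∀ x ∈ t₁, x ≠ hh := by
        intro x hx hq
        exact hn1 (by rw [← hq]; exact List.mem_map_of_mem hx)
      have hne2 : ∀ x ∈ t₂, x ≠ hh := by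
        intro x hx hq
        exact hn2 (by rw [← hq]; exact List.mem_map_of_mem hx)
      -- A's min-scan returns hh's city
      have hmin : PySem.List.min? d.keys (fun k => d.getD k 0) = some hh.2.2 := by
        have hkeys : d.keys = (t₁.map fun x => x.2.2) ++ hh.2.2 :: (t₂.map fun x => x.2.2) := by
          simp [PySem.Dict.keys, hitems, hts, eProj, Function.comp_def]
        rw [hkeys]
        refine minp_split _ _ _ _ ?_ ?_
        · intro k hk
          obtain ⟨x, hx, rfl⟩ := List.mem_map.mp hk
          have hxt : x ∈ t := by rw [hts]; exact List.mem_append_left _ hx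
          rw [getD_eq hitems hnd hxt, getD_eq hitems hnd hht]
          have h1 := hrest x hxt (hne1 x hx)
          have h2 := hs1 x hx
          unfold eLt at h1; omega
        · intro k hk
          obtain ⟨x, hx, rfl⟩ := List.mem_map.mp hk
          have hxt : x ∈ t := by rw [hts]; exact List.mem_append_right _ (List.mem_cons_of_mem _ hx)
          rw [getD_eq hitems hnd hxt, getD_eq hitems hnd hht]
          have h1 := hrest x hxt (hne2 x hx)
          unfold eLt at h1; omega
      have hA : stepA cacheSize (ans, d) city0
          = (ans + 5, (d.erase hh.2.2).insert city 1) := by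
        simp only [stepA, ← hcity, hcf, Bool.false_eq_true, if_false, hsz, hmin]
      have hB : stepB cacheSize (ans, l, ctr) city0 = (ans + 5, insB rest (1, ctr, city), ctr + 1) := by
        have hpn' : popCity city (hh :: rest) = none := hl ▸ hpn
        have hlt' : cacheSize < ((hh :: rest).length : Int) := by rw [← hl, ← hlen]; omega
        rw [hl]
        simp only [stepB, ← hcity, hpn', hlt', if_true, List.tail_cons]
      rw [hA, hB]
      refine ⟨rfl, ?_⟩
      show CacheInv ((d.erase hh.2.2).insert city 1) (insB rest (1, ctr, city)) (ctr + 1)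
      have herased : (d.erase hh.2.2).items = (t₁ ++ t₂).map eProj := by
        show (d.items.filter _) = _
        rw [hitems, hts]
        exact erase_items hn1 hn2
      have hcf2 : (d.erase hh.2.2).contains city = false := by
        rw [contains_eq herased city]
        refine List.any_eq_false.mpr ?_
        intro x hx
        have hxt : x ∈ t := by
          rw [hts]
          rcases List.mem_append.mp hx with h1 | h2
          · exact List.mem_append_left _ h1
          · exact List.mem_append_right _ (List.mem_cons_of_mem _ h2)
        simp [hnotin x hxt]
      have hrperm : rest.Perm (t₁ ++ t₂) := by
        have := perm_cancel (u := []) (v := rest) (e := hh) (by rw [hl]; rfl) (hts ▸ hperm)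
        simpa using this
      refine ⟨(t₁ ++ t₂) ++ [(1, ctr, city)], ?_, ?_, ?_, ?_, ?_, ?_⟩
      · simp only [PySem.Dict.insert, hcf2, Bool.false_eq_true, if_false]
        rw [herased]
        simp [eProj]
      · simp only [List.map_append, List.map_singleton]
        rw [List.pairwise_append]
        refine ⟨by simpa using hs3, List.pairwise_singleton _ _, ?_⟩
        intro a ha b hb
        rcases List.mem_singleton.mp hb with rfl
        have ha' : a ∈ (t₁ ++ t₂).map fun x => x.2.1 := by simpa using ha
        obtain ⟨x, hx, rfl⟩ := List.mem_map.mp ha'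
        rcases List.mem_append.mp hx with h1 | h2
        · exact hbound x (by rw [hts]; exact List.mem_append_left _ h1)
        · exact hbound x (by rw [hts]; exact List.mem_append_right _ (List.mem_cons_of_mem _ h2))
      · intro x hx
        rcases List.mem_append.mp hx with hx1 | hx2
        · have hxt : x ∈ t := by
            rw [hts]
            rcases List.mem_append.mp hx1 with h1 | h2
            · exact List.mem_append_left _ h1
            · exact List.mem_append_right _ (List.mem_cons_of_mem _ h2)
          have := hbound x hxt; omega
        · rcases List.mem_singleton.mp hx2 with rfl; exact lt_add_one _
      · simp only [List.map_append, List.map_singleton]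
        rw [List.nodup_append]
        refine ⟨by simpa using hn3, List.nodup_singleton _, ?_⟩
        intro a ha b hb
        rcases List.mem_singleton.mp hb with rfl
        have ha' : a ∈ (t₁ ++ t₂).map fun x => x.2.2 := by simpa using ha
        rcases List.mem_append.mp ((List.map_append .. ▸ ha' : _)) with h1 | h2
        · obtain ⟨x, hx, rfl⟩ := List.mem_map.mp h1
          exact hnotin x (by rw [hts]; exact List.mem_append_left _ hx)
        · obtain ⟨x, hx, rfl⟩ := List.mem_map.mp h2
          exact hnotin x (by rw [hts]; exact List.mem_append_right _ (List.mem_cons_of_mem _ hx))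
      · refine (insB_perm rest _).trans ?_
        exact (hrperm.cons _).trans (List.perm_append_singleton _ _).symm
      · have hrs : rest.Pairwise eLt := (List.pairwise_cons.mp (hl ▸ hsort)).2
        refine insB_sorted hrs ?_
        intro x hx hq
        have hxt : x ∈ t := hperm.mem_iff.mp (by rw [hl]; exact List.mem_cons_of_mem _ hx)
        have := hbound x hxt
        simp at hq; omega

lemma fold_ok (cacheSize : Int) (hcs : 0 ≤ cacheSize) (cities : List String) :
    ∀ (ans : Int) (d : PySem.Dict String Int) l ctr, CacheInv d l ctr →
    (cities.foldl (stepA cacheSize) (ans, d)).1 = (cities.foldl (stepB cacheSize) (ans, l, ctr)).1 := by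
  induction cities with
  | nil => intro ans d l ctr _; rfl
  | cons c cs ih =>
    intro ans d l ctr h
    have hs := step_ok cacheSize hcs c (ans := ans) h
    simp only [List.foldl_cons]
    have h1 : stepA cacheSize (ans, d) c = ((stepA cacheSize (ans, d) c).1, (stepA cacheSize (ans, d) c).2) := rfl
    have h2 : stepB cacheSize (ans, l, ctr) c
        = ((stepB cacheSize (ans, l, ctr) c).1, (stepB cacheSize (ans, l, ctr) c).2.1, (stepB cacheSize (ans, l, ctr) c).2.2) := rfl
    rw [h1, h2, hs.1]
    exact ih _ _ _ _ hs.2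

-- ===== VERDICT (by name: the statement is the Claim_ definition above) =====
theorem solution_spec : Claim_equal_solution := by
  intro cacheSize cities _ hpre
  unfold Spec_solution solution solution_alt
  rcases hpre with hcs | hnil
  · exact fold_ok cacheSize hcs cities 0 _ [] 0 ⟨[], by simp⟩
  · subst hnil; rfl
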